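-- pv_equiv track=rewrite | github.com/bottyash/IITGn_Day8_AM | TaskD.py | validate_pan
-- ===== SOURCE A (Python) =====
-- TAXPAYER_TYPES = {
--     "P": "Individual",
--     "C": "Company",
--     "H": "HUF (Hindu Undivided Family)",
--     "F": "Firm",
--     "A": "AOP (Association of Persons)",
--     "T": "Trust",
--     "B": "BOI (Body of Individuals)",
--     "L": "Local Authority",
--     "J": "Artificial Juridical Person",
--     "G": "Government",
-- }
--
-- def validate_pan(pan):
--     # handle None or blank input before anything else
--     if not pan:
--         return False, "PAN cannot be empty"
--
--     pan = pan.strip().upper()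
--
--     if len(pan) != 10:
--         return False, f"PAN must be exactly 10 characters (got {len(pan)})"
--
--     # first 5 must be uppercase letters
--     for i in range(5):
--         if not pan[i].isupper():
--             return False, f"Character {i+1} must be an uppercase letter (got '{pan[i]}')"
--
--     # next 4 must be digits
--     for i in range(5, 9):
--         if not pan[i].isdigit():
--             return False, f"Character {i+1} must be a digit (got '{pan[i]}')"
--
--     # last character must be an uppercase letter
--     if not pan[9].isupper():
--         return False, f"Character 10 must be an uppercase letter (got '{pan[9]}')"
--
--     # 4th character indicates entity type - pan[3] is index 3
--     fourth = pan[3]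
--     entity = TAXPAYER_TYPES.get(fourth, f"Unknown entity code '{fourth}'")
--
--     return True, f"Valid PAN  |  Taxpayer type: {entity}"
-- ===== SOURCE B (Python) =====
-- TAXPAYER_TYPES = {
--     "P": "Individual",
--     "C": "Company",
--     "H": "HUF (Hindu Undivided Family)",
--     "F": "Firm",
--     "A": "AOP (Association of Persons)",
--     "T": "Trust",
--     "B": "BOI (Body of Individuals)",
--     "L": "Local Authority",
--     "J": "Artificial Juridical Person",
--     "G": "Government",
-- }
--
-- TEMPLATE = "AAAAA0000A"  # 'A' = uppercase letter expected, '0' = digit expected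
--
-- def validate_pan(pan):
--     if not pan:
--         return False, "PAN cannot be empty"
--
--     pan = pan.strip().upper()
--
--     if len(pan) != 10:
--         return False, f"PAN must be exactly 10 characters (got {len(pan)})"
--
--     # classify the whole string into a shape signature, then diff it against the template
--     sig = "".join("A" if c.isupper() else "0" if c.isdigit() else "?" for c in pan)
--     bad = [i for i, (have, want) in enumerate(zip(sig, TEMPLATE)) if have != want]
--     if bad:
--         i = bad[0]
--         need = "an uppercase letter" if TEMPLATE[i] == "A" else "a digit"
--         return False, f"Character {i+1} must be {need} (got '{pan[i]}')"
--
--     entity = TAXPAYER_TYPES.get(pan[3], f"Unknown entity code '{pan[3]}'")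
--     return True, f"Valid PAN  |  Taxpayer type: {entity}"
-- ===== Notes on version B (the rewrite author's own statement) =====
-- stated objective: alternative
-- what changed: Instead of A's sequential per-position checks (two range loops plus a standalone index-9 test, each with early return), B classifies the whole string into a shape signature (one class character per input character), diffs the signature against a constant 10-character template, and derives the error message for the first mismatching position from the template entry there.
import Mathlib
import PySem

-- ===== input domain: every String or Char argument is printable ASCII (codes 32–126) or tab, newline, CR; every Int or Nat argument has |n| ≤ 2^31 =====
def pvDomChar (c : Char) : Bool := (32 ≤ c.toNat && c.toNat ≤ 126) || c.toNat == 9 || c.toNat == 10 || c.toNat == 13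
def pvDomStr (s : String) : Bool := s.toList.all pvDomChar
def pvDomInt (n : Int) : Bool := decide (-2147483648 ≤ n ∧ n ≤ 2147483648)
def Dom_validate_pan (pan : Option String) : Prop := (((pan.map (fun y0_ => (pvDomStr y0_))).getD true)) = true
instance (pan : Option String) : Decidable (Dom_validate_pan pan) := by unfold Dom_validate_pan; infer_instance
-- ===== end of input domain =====

-- B replaces A's sequential per-position checks by a whole-string shape signature diffed
-- against a constant template; objective: alternative decomposition, same cost. Return value
-- only (A rebinds its local 'pan'; no caller-visible mutation).

-- ===== PORT A =====
def vpTaxpayerTypes : PySem.Dict Char String :=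
  PySem.Dict.ofList
    [('P', "Individual"), ('C', "Company"), ('H', "HUF (Hindu Undivided Family)"),
     ('F', "Firm"), ('A', "AOP (Association of Persons)"), ('T', "Trust"),
     ('B', "BOI (Body of Individuals)"), ('L', "Local Authority"),
     ('J', "Artificial Juridical Person"), ('G', "Government")]

-- A's `for i in range(5)` loop: first failure returns the error pair, else none
def vpLoopUpper : List Int → List Char → Option (Bool × String)
  | [], _ => none
  | i :: rest, t =>
      let c := PySem.List.pyGetD t i ' '
      if !(PySem.Chars.isupper c) then
        some (false, String.ofList ("Character ".toList ++ PySem.Int.toChars (i + 1) ++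
          " must be an uppercase letter (got '".toList ++ [c] ++ "')".toList))
      else vpLoopUpper rest t

-- A's `for i in range(5, 9)` loop
def vpLoopDigit : List Int → List Char → Option (Bool × String)
  | [], _ => none
  | i :: rest, t =>
      let c := PySem.List.pyGetD t i ' '
      if !(PySem.Chars.isdigit c) then
        some (false, String.ofList ("Character ".toList ++ PySem.Int.toChars (i + 1) ++
          " must be a digit (got '".toList ++ [c] ++ "')".toList))
      else vpLoopDigit rest t

def validate_pan (pan : Option String) : Bool × String :=
  match pan with
  | none => (false, "PAN cannot be empty")
  | some s =>
    if s.toList = [] then (false, "PAN cannot be empty")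
    else
      let t := PySem.Chars.upper (PySem.Chars.strip s.toList)
      if t.length ≠ 10 then
        (false, String.ofList ("PAN must be exactly 10 characters (got ".toList ++
          PySem.Int.toChars (t.length : Int) ++ ")".toList))
      else
        match vpLoopUpper (PySem.List.pyRange 0 5 1) t with
        | some r => r
        | none =>
          match vpLoopDigit (PySem.List.pyRange 5 9 1) t with
          | some r => r
          | none =>
            let c9 := PySem.List.pyGetD t 9 ' '
            if !(PySem.Chars.isupper c9) then
              (false, String.ofList ("Character 10 must be an uppercase letter (got '".toList ++
                [c9] ++ "')".toList))
            else
              let fourth := PySem.List.pyGetD t 3 ' '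
              let entity := vpTaxpayerTypes.getD fourth
                (String.ofList ("Unknown entity code '".toList ++ [fourth] ++ "'".toList))
              (true, String.ofList ("Valid PAN  |  Taxpayer type: ".toList ++ entity.toList))

-- ===== PORT B =====
-- TEMPLATE = "AAAAA0000A"
def vpTemplate : List Char := "AAAAA0000A".toList

-- the per-character classifier of B's generator expression
def vpClassify (c : Char) : Char :=
  if PySem.Chars.isupper c then 'A' else if PySem.Chars.isdigit c then '0' else '?'

def validate_pan_alt (pan : Option String) : Bool × String :=
  match pan with
  | none => (false, "PAN cannot be empty")
  | some s =>
    if s.toList = [] then (false, "PAN cannot be empty")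
    else
      let t := PySem.Chars.upper (PySem.Chars.strip s.toList)
      if t.length ≠ 10 then
        (false, String.ofList ("PAN must be exactly 10 characters (got ".toList ++
          PySem.Int.toChars (t.length : Int) ++ ")".toList))
      else
        -- sig = "".join('A' if c.isupper() else '0' if c.isdigit() else '?' for c in pan)
        let sig := t.map vpClassify
        -- bad = [i for i, (have, want) in enumerate(zip(sig, TEMPLATE)) if have != want]
        let bad := ((PySem.List.enumerate (sig.zip vpTemplate)).filter
          (fun p => p.2.1 ≠ p.2.2)).map (·.1)
        match bad with
        | i :: _ =>
          let need := if PySem.List.pyGetD vpTemplate i ' ' = 'A' then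
              "an uppercase letter".toList else "a digit".toList
          (false, String.ofList ("Character ".toList ++ PySem.Int.toChars (i + 1) ++
            " must be ".toList ++ need ++ " (got '".toList ++ [PySem.List.pyGetD t i ' '] ++
            "')".toList))
        | [] =>
          let fourth := PySem.List.pyGetD t 3 ' '
          let entity := vpTaxpayerTypes.getD fourth
            (String.ofList ("Unknown entity code '".toList ++ [fourth] ++ "'".toList))
          (true, String.ofList ("Valid PAN  |  Taxpayer type: ".toList ++ entity.toList))

-- ===== PRECONDITION & SPEC =====
def Spec_validate_pan (pan : Option String) (out : Bool × String) : Prop := out = validate_pan_alt pan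
instance (pan : Option String) (out : Bool × String) : Decidable (Spec_validate_pan pan out) := by unfold Spec_validate_pan; infer_instance

-- ===== CLAIM (what is proved, stated in full; the proofs are below) =====
def Claim_equal_validate_pan : Prop := ∀ (pan : Option String), Dom_validate_pan pan → Spec_validate_pan pan (validate_pan pan)

-- ===== LEMMAS AND PROOFS =====

theorem vpDigit_not_upper (c : Char) (h : PySem.Chars.isdigit c = true) :
    PySem.Chars.isupper c = false := by
  simp only [PySem.Chars.isupper, PySem.Chars.isdigit, Bool.and_eq_true, decide_eq_true_eq] at h ⊢
  have h9 : ('9' : Char) < 'A' := by decide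
  simp
  intro hA
  exact absurd (lt_of_le_of_lt h.2 h9) (not_lt.mpr hA)

theorem vpClassify_eq_A (c : Char) (h : PySem.Chars.isupper c = true) : vpClassify c = 'A' := by
  simp [vpClassify, h]

theorem vpClassify_eq_0 (c : Char) (h : PySem.Chars.isdigit c = true) : vpClassify c = '0' := by
  simp [vpClassify, vpDigit_not_upper c h, h]

theorem vpClassify_ne_A (c : Char) (h : PySem.Chars.isupper c = false) : vpClassify c ≠ 'A' := by
  simp [vpClassify, h]
  split_ifs <;> decide

theorem vpClassify_ne_0 (c : Char) (h : PySem.Chars.isdigit c = false) : vpClassify c ≠ '0' := by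
  simp [vpClassify, h]
  split_ifs <;> decide

-- the two ports agree after the empty- and length-checks
set_option maxHeartbeats 3200000 in
theorem vpCore (t : List Char) (hlen : t.length = 10) :
    (match vpLoopUpper (PySem.List.pyRange 0 5 1) t with
     | some r => r
     | none =>
       match vpLoopDigit (PySem.List.pyRange 5 9 1) t with
       | some r => r
       | none =>
         let c9 := PySem.List.pyGetD t 9 ' '
         if !(PySem.Chars.isupper c9) then
           (false, String.ofList ("Character 10 must be an uppercase letter (got '".toList ++
             [c9] ++ "')".toList))
         else
           let fourth := PySem.List.pyGetD t 3 ' '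
           let entity := vpTaxpayerTypes.getD fourth
             (String.ofList ("Unknown entity code '".toList ++ [fourth] ++ "'".toList))
           (true, String.ofList ("Valid PAN  |  Taxpayer type: ".toList ++ entity.toList))) =
    (let sig := t.map vpClassify
     let bad := ((PySem.List.enumerate (sig.zip vpTemplate)).filter
       (fun p => p.2.1 ≠ p.2.2)).map (·.1)
     match bad with
     | i :: _ =>
       let need := if PySem.List.pyGetD vpTemplate i ' ' = 'A' then
           "an uppercase letter".toList else "a digit".toList
       (false, String.ofList ("Character ".toList ++ PySem.Int.toChars (i + 1) ++
         " must be ".toList ++ need ++ " (got '".toList ++ [PySem.List.pyGetD t i ' '] ++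
         "')".toList))
     | [] =>
       let fourth := PySem.List.pyGetD t 3 ' '
       let entity := vpTaxpayerTypes.getD fourth
         (String.ofList ("Unknown entity code '".toList ++ [fourth] ++ "'".toList))
       (true, String.ofList ("Valid PAN  |  Taxpayer type: ".toList ++ entity.toList))) := by
  rcases t with _|⟨c0,_|⟨c1,_|⟨c2,_|⟨c3,_|⟨c4,_|⟨c5,_|⟨c6,_|⟨c7,_|⟨c8,_|⟨c9,_|⟨c10,t⟩⟩⟩⟩⟩⟩⟩⟩⟩⟩⟩ <;>
    try (exfalso; revert hlen; simp <;> omega)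
  have hr1 : PySem.List.pyRange 0 5 1 = [0, 1, 2, 3, 4] := by decide
  have hr2 : PySem.List.pyRange 5 9 1 = [5, 6, 7, 8] := by decide
  rw [hr1, hr2]
  simp only [vpLoopUpper, vpLoopDigit, List.map, List.zip, vpTemplate]
  by_cases k0 : PySem.Chars.isupper c0
  case neg => simp [k0, vpClassify_ne_A c0 (by simpa using k0), PySem.List.pyGetD]
  by_cases k1 : PySem.Chars.isupper c1
  case neg => simp [k0, k1, vpClassify_eq_A c0 k0, vpClassify_ne_A c1 (by simpa using k1), PySem.List.pyGetD]
  by_cases k2 : PySem.Chars.isupper c2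
  case neg => simp [k0, k1, k2, vpClassify_eq_A c0 k0, vpClassify_eq_A c1 k1, vpClassify_ne_A c2 (by simpa using k2), PySem.List.pyGetD]
  by_cases k3 : PySem.Chars.isupper c3
  case neg => simp [k0, k1, k2, k3, vpClassify_eq_A c0 k0, vpClassify_eq_A c1 k1, vpClassify_eq_A c2 k2, vpClassify_ne_A c3 (by simpa using k3), PySem.List.pyGetD]
  by_cases k4 : PySem.Chars.isupper c4
  case neg => simp [k0, k1, k2, k3, k4, vpClassify_eq_A c0 k0, vpClassify_eq_A c1 k1, vpClassify_eq_A c2 k2, vpClassify_eq_A c3 k3, vpClassify_ne_A c4 (by simpa using k4), PySem.List.pyGetD]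
  by_cases k5 : PySem.Chars.isdigit c5
  case neg => simp [k0, k1, k2, k3, k4, k5, vpClassify_eq_A c0 k0, vpClassify_eq_A c1 k1, vpClassify_eq_A c2 k2, vpClassify_eq_A c3 k3, vpClassify_eq_A c4 k4, vpClassify_ne_0 c5 (by simpa using k5), PySem.List.pyGetD]
  by_cases k6 : PySem.Chars.isdigit c6
  case neg => simp [k0, k1, k2, k3, k4, k5, k6, vpClassify_eq_A c0 k0, vpClassify_eq_A c1 k1, vpClassify_eq_A c2 k2, vpClassify_eq_A c3 k3, vpClassify_eq_A c4 k4, vpClassify_eq_0 c5 k5, vpClassify_ne_0 c6 (by simpa using k6), PySem.List.pyGetD]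
  by_cases k7 : PySem.Chars.isdigit c7
  case neg => simp [k0, k1, k2, k3, k4, k5, k6, k7, vpClassify_eq_A c0 k0, vpClassify_eq_A c1 k1, vpClassify_eq_A c2 k2, vpClassify_eq_A c3 k3, vpClassify_eq_A c4 k4, vpClassify_eq_0 c5 k5, vpClassify_eq_0 c6 k6, vpClassify_ne_0 c7 (by simpa using k7), PySem.List.pyGetD]
  by_cases k8 : PySem.Chars.isdigit c8
  case neg => simp [k0, k1, k2, k3, k4, k5, k6, k7, k8, vpClassify_eq_A c0 k0, vpClassify_eq_A c1 k1, vpClassify_eq_A c2 k2, vpClassify_eq_A c3 k3, vpClassify_eq_A c4 k4, vpClassify_eq_0 c5 k5, vpClassify_eq_0 c6 k6, vpClassify_eq_0 c7 k7, vpClassify_ne_0 c8 (by simpa using k8), PySem.List.pyGetD]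
  have h10 : PySem.Int.toChars 10 = ['1','0'] := by decide
  by_cases k9 : PySem.Chars.isupper c9
  case neg => simp [h10, k0, k1, k2, k3, k4, k5, k6, k7, k8, k9, vpClassify_eq_A c0 k0, vpClassify_eq_A c1 k1, vpClassify_eq_A c2 k2, vpClassify_eq_A c3 k3, vpClassify_eq_A c4 k4, vpClassify_eq_0 c5 k5, vpClassify_eq_0 c6 k6, vpClassify_eq_0 c7 k7, vpClassify_eq_0 c8 k8, vpClassify_ne_A c9 (by simpa using k9), PySem.List.pyGetD]
  simp [k0, k1, k2, k3, k4, k5, k6, k7, k8, k9, vpClassify_eq_A c0 k0, vpClassify_eq_A c1 k1, vpClassify_eq_A c2 k2, vpClassify_eq_A c3 k3, vpClassify_eq_A c4 k4, vpClassify_eq_0 c5 k5, vpClassify_eq_0 c6 k6, vpClassify_eq_0 c7 k7, vpClassify_eq_0 c8 k8, vpClassify_eq_A c9 k9, PySem.List.pyGetD]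

set_option maxHeartbeats 3200000 in
theorem validate_pan_spec' (pan : Option String) :
    validate_pan pan = validate_pan_alt pan := by
  cases pan with
  | none => rfl
  | some s =>
    simp only [validate_pan, validate_pan_alt]
    by_cases h0 : s.toList = []
    · simp [h0]
    · simp only [h0, if_false]
      by_cases hlen : (PySem.Chars.upper (PySem.Chars.strip s.toList)).length ≠ 10
      · simp [hlen]
      · simp only [hlen, if_false]
        exact vpCore _ (not_ne_iff.mp hlen)

-- ===== VERDICT (by name: the statement is the Claim_ definition above) =====
theorem validate_pan_spec : Claim_equal_validate_pan := by
  intro pan _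
  unfold Spec_validate_pan
  exact validate_pan_spec' pan
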